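-- pv_equiv track=rewrite | github.com/bbartling/open-fdd-automated-testing | openfdd_stack/platform/selene/naming.py | _normalise_segment
-- ===== SOURCE A (Python) =====
-- _SEGMENT_SEPARATORS = {"_", " ", "\t", ".", ":", "-"}
--
-- def _normalise_segment(segment: str) -> str:
--     """Within-segment normalisation. See :func:`canonical_name`."""
--     out: list[str] = []
--     last_was_hyphen = True  # strips leading hyphen
--     for ch in segment:
--         if "a" <= ch <= "z" or "0" <= ch <= "9":
--             out.append(ch)
--             last_was_hyphen = False
--         elif "A" <= ch <= "Z":
--             out.append(ch.lower())
--             last_was_hyphen = False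
--         elif ch in _SEGMENT_SEPARATORS:
--             if not last_was_hyphen:
--                 out.append("-")
--                 last_was_hyphen = True
--         # everything else (non-ASCII, unmapped punctuation): drop silently
--     # Strip trailing hyphens.
--     while out and out[-1] == "-":
--         out.pop()
--     return "".join(out)
-- ===== SOURCE B (Python) =====
-- _SEGMENT_SEPARATORS = {"_", " ", "\t", ".", ":", "-"}
--
-- def _normalise_segment(segment: str) -> str:
--     """Tokenize into alphanumeric runs and join them with hyphens."""
--     words: list[str] = []
--     buf: list[str] = []
--     for ch in segment:
--         if "a" <= ch <= "z" or "0" <= ch <= "9":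
--             buf.append(ch)
--         elif "A" <= ch <= "Z":
--             buf.append(ch.lower())
--         elif ch in _SEGMENT_SEPARATORS:
--             if buf:
--                 words.append("".join(buf))
--                 buf = []
--         # other characters: dropped, do not flush
--     if buf:
--         words.append("".join(buf))
--     return "-".join(words)
-- ===== Notes on version B (the rewrite author's own statement) =====
-- stated objective: simpler
-- what changed: A's hyphen-emitting state machine (last_was_hyphen flag plus a trailing-pop loop) is replaced by a tokenizer that collects lowercased alphanumeric runs into a word list and joins the words with hyphens.
import Mathlib
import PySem

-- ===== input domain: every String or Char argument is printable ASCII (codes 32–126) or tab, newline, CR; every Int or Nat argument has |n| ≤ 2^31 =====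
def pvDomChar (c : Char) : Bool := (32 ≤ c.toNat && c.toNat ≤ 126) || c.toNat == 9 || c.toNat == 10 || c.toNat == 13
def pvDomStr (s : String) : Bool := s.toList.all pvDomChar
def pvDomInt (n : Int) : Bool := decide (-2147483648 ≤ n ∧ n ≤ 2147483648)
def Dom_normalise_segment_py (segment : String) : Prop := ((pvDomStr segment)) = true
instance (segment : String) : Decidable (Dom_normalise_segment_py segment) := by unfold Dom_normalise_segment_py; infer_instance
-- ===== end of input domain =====

-- B replaces A's hyphen-emitting state machine (last_was_hyphen flag + trailing-pop loop) by a
-- tokenizer: collect lowercased alphanumeric runs as words and join them with hyphens (objective: simpler decomposition).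

-- ===== PORT A =====
def pySepChars : List Char := ['_', ' ', '\t', '.', ':', '-']

-- one iteration of A's for-loop; state = (out, last_was_hyphen)
def aStep (st : List Char × Bool) (ch : Char) : List Char × Bool :=
  if ('a' ≤ ch ∧ ch ≤ 'z') ∨ ('0' ≤ ch ∧ ch ≤ '9') then (st.1 ++ [ch], false)
  else if 'A' ≤ ch ∧ ch ≤ 'Z' then (st.1 ++ [ch.toLower], false)
  else if ch ∈ pySepChars then
    (if st.2 then st else (st.1 ++ ['-'], true))
  else st

-- A's trailing `while out and out[-1] == "-": out.pop()` loop
def popTrail (out : List Char) : List Char :=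
  if _h : out.getLast? = some '-' then popTrail out.dropLast else out
termination_by out.length
decreasing_by
  have hne : out ≠ [] := fun hnil => by simp [hnil] at _h
  rw [List.length_dropLast]
  have := List.length_pos_of_ne_nil hne
  omega

def normalise_segment_py (segment : String) : String :=
  let st := segment.toList.foldl aStep ([], true)
  String.ofList (popTrail st.1)

-- ===== PORT B =====
-- one iteration of B's for-loop; state = (words, buf)
def bStep (st : List String × List Char) (ch : Char) : List String × List Char :=
  if ('a' ≤ ch ∧ ch ≤ 'z') ∨ ('0' ≤ ch ∧ ch ≤ '9') then (st.1, st.2 ++ [ch])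
  else if 'A' ≤ ch ∧ ch ≤ 'Z' then (st.1, st.2 ++ [ch.toLower])
  else if ch ∈ pySepChars then (if st.2 = [] then st else (st.1 ++ [String.ofList st.2], []))
  else st

-- port of Python's '"-".join(words)'
def joinHyphen : List String → String
  | [] => ""
  | [w] => w
  | w :: ws => w ++ "-" ++ joinHyphen ws

def normalise_segment_py_alt (segment : String) : String :=
  let st := segment.toList.foldl bStep ([], [])
  let words := if st.2 = [] then st.1 else st.1 ++ [String.ofList st.2]
  joinHyphen words

-- ===== PRECONDITION & SPEC =====
def Spec_normalise_segment_py (segment : String) (out : String) : Prop := out = normalise_segment_py_alt segment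
instance (segment : String) (out : String) : Decidable (Spec_normalise_segment_py segment out) := by unfold Spec_normalise_segment_py; infer_instance

-- ===== CLAIM (what is proved, stated in full; the proofs are below) =====
def Claim_equal_normalise_segment_py : Prop := ∀ (segment : String), Dom_normalise_segment_py segment → Spec_normalise_segment_py segment (normalise_segment_py segment)

-- ===== LEMMAS AND PROOFS =====

-- char-level rendering of B's word list: the characters joinHyphen produces
def joinChars : List String → List Char
  | [] => []
  | [w] => w.toList
  | w :: ws => w.toList ++ '-' :: joinChars ws

theorem joinHyphen_toList (ws : List String) : (joinHyphen ws).toList = joinChars ws := by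
  induction ws with
  | nil => rfl
  | cons w ws ih =>
    cases ws with
    | nil => rfl
    | cons x xs => simp [joinHyphen, joinChars] at ih ⊢; simp [ih]

theorem joinChars_append_one (ws : List String) (w : String) :
    joinChars (ws ++ [w]) = joinChars ws ++ (if ws = [] then [] else ['-']) ++ w.toList := by
  induction ws with
  | nil => rfl
  | cons x xs ih =>
    cases xs with
    | nil => simp [joinChars]
    | cons y ys => simp [joinChars] at ih ⊢; simp [ih]

-- popTrail facts
theorem popTrail_nil : popTrail [] = [] := by rw [popTrail]; simp

theorem popTrail_no_hyphen (l : List Char) (h : l.getLast? ≠ some '-') : popTrail l = l := by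
  rw [popTrail]; simp [h]

theorem popTrail_concat_hyphen (l : List Char) : popTrail (l ++ ['-']) = popTrail l := by
  rw [popTrail]; simp

-- a good word: nonempty, no hyphen inside
def GoodW (w : String) : Prop := w.toList ≠ [] ∧ '-' ∉ w.toList

theorem joinChars_ne_nil (ws : List String) (hne : ws ≠ []) (hws : ∀ w ∈ ws, GoodW w) :
    joinChars ws ≠ [] := by
  cases ws with
  | nil => exact absurd rfl hne
  | cons w xs =>
    have hw := (hws w (by simp)).1
    cases xs with
    | nil =>
      intro hcon
      exact hw (by simpa [joinChars] using hcon)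
    | cons y ys => simp [joinChars]

theorem joinChars_last_ne (ws : List String) (hws : ∀ w ∈ ws, GoodW w) :
    (joinChars ws).getLast? ≠ some '-' := by
  induction ws with
  | nil => simp [joinChars]
  | cons w xs ih =>
    cases xs with
    | nil =>
      have hw := hws w (by simp)
      simp only [joinChars]
      intro hc
      exact hw.2 (List.mem_of_getLast? hc)
    | cons y ys =>
      have hall : ∀ v ∈ y :: ys, GoodW v := fun v hv => hws v (by simp [hv])
      have ih' := ih hall
      have hrest : joinChars (y :: ys) ≠ [] := joinChars_ne_nil _ (by simp) hall
      simp only [joinChars] at ih' ⊢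
      intro hc
      rw [show w.toList ++ '-' :: joinChars (y :: ys)
            = (w.toList ++ ['-']) ++ joinChars (y :: ys) by simp,
          List.getLast?_append_of_ne_nil _ hrest] at hc
      exact ih' hc

-- chars taken by the alnum branches are never '-'
theorem lower_ne_hyphen (c : Char) (h : ('a' ≤ c ∧ c ≤ 'z') ∨ ('0' ≤ c ∧ c ≤ '9')) : c ≠ '-' := by
  intro hc; subst hc
  rcases h with ⟨h1, _⟩ | ⟨h1, _⟩ <;> exact absurd h1 (by decide)

theorem toLower_ne_hyphen (c : Char) (h : 'A' ≤ c ∧ c ≤ 'Z') : c.toLower ≠ '-' := by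
  obtain ⟨h1, h2⟩ := h
  simp only [Char.le_def] at h1 h2
  intro hc
  have hv : c.toLower.val = ('-' : Char).val := by rw [hc]
  rw [Char.toLower, dif_pos ⟨h1, h2⟩] at hv
  have t1 : (c.toNat + 32) % 4294967296 = 45 := by
    have := congrArg UInt32.toNat hv
    simpa [UInt32.toNat_add] using this
  have h2' : c.val.toNat ≤ 90 := by
    rw [UInt32.le_iff_toNat_le] at h2
    exact h2
  have h1' : 65 ≤ c.val.toNat := by
    rw [UInt32.le_iff_toNat_le] at h1
    exact h1
  have ht : Char.toNat c = c.val.toNat := rfl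
  rw [ht] at t1
  omega

-- the loop invariant: A's state (out, flag) rendered from B's state (words, buf)
def StInv (a : List Char × Bool) (b : List String × List Char) : Prop :=
  a.1 = joinChars b.1 ++ (if b.1 = [] then [] else ['-']) ++ b.2
  ∧ (a.2 = true ↔ b.2 = [])
  ∧ (∀ w ∈ b.1, GoodW w)
  ∧ '-' ∉ b.2

theorem StInv_step (a : List Char × Bool) (b : List String × List Char) (c : Char)
    (h : StInv a b) : StInv (aStep a c) (bStep b c) := by
  obtain ⟨h1, h2, h3, h4⟩ := h
  by_cases hlo : ('a' ≤ c ∧ c ≤ 'z') ∨ ('0' ≤ c ∧ c ≤ '9')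
  · have hcne : c ≠ '-' := lower_ne_hyphen c hlo
    have ea : aStep a c = (a.1 ++ [c], false) := by simp [aStep, hlo]
    have eb : bStep b c = (b.1, b.2 ++ [c]) := by simp [bStep, hlo]
    rw [ea, eb]
    refine ⟨?_, by simp, h3, ?_⟩
    · simp [h1]
    · simp
      exact ⟨h4, fun e => hcne e.symm⟩
  · by_cases hup : 'A' ≤ c ∧ c ≤ 'Z'
    · have hcne : c.toLower ≠ '-' := toLower_ne_hyphen c hup
      have ea : aStep a c = (a.1 ++ [c.toLower], false) := by simp [aStep, hlo, hup]
      have eb : bStep b c = (b.1, b.2 ++ [c.toLower]) := by simp [bStep, hlo, hup]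
      rw [ea, eb]
      refine ⟨?_, by simp, h3, ?_⟩
      · simp [h1]
      · simp
        exact ⟨h4, fun e => hcne e.symm⟩
    · by_cases hsep : c ∈ pySepChars
      · by_cases hbuf : b.2 = []
        · have hflag : a.2 = true := h2.mpr hbuf
          have ea : aStep a c = a := by simp [aStep, hlo, hup, hsep, hflag]
          have eb : bStep b c = b := by simp [bStep, hlo, hup, hsep, hbuf]
          rw [ea, eb]
          exact ⟨h1, h2, h3, h4⟩
        · have hflag : a.2 = false := by
            cases hb : a.2
            · rfl
            · exact absurd (h2.mp hb) hbuf
          have ea : aStep a c = (a.1 ++ ['-'], true) := by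
            simp [aStep, hlo, hup, hsep, hflag]
          have eb : bStep b c = (b.1 ++ [String.ofList b.2], []) := by
            simp [bStep, hlo, hup, hsep, hbuf]
          rw [ea, eb]
          refine ⟨?_, by simp, ?_, by simp⟩
          · simp only []
            simp [h1, joinChars_append_one]
          · intro w hw
            simp at hw
            rcases hw with hw | hw
            · exact h3 w hw
            · subst hw; exact ⟨by simpa using hbuf, by simpa using h4⟩
      · have ea : aStep a c = a := by simp [aStep, hlo, hup, hsep]
        have eb : bStep b c = b := by simp [bStep, hlo, hup, hsep]
        rw [ea, eb]
        exact ⟨h1, h2, h3, h4⟩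

theorem StInv_foldl (cs : List Char) :
    StInv (cs.foldl aStep ([], true)) (cs.foldl bStep ([], [])) := by
  induction cs using List.reverseRecOn with
  | nil => exact ⟨rfl, by simp, by simp, by simp⟩
  | append_singleton cs c ih => simpa [List.foldl_append] using StInv_step _ _ c ih

theorem ofList_eq_joinHyphen (ws : List String) (X : List Char)
    (h : X = joinChars ws) : String.ofList X = joinHyphen ws := by
  rw [h, ← joinHyphen_toList]; simp

-- ===== VERDICT (by name: the statement is the Claim_ definition above) =====
theorem normalise_segment_py_spec : Claim_equal_normalise_segment_py := by
  intro segment _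
  unfold Spec_normalise_segment_py normalise_segment_py normalise_segment_py_alt
  obtain ⟨h1, h2, h3, h4⟩ := StInv_foldl segment.toList
  set a := segment.toList.foldl aStep ([], true) with ha
  set b := segment.toList.foldl bStep ([], []) with hb
  by_cases hbuf : b.2 = []
  · simp only [hbuf, ite_true]
    rw [h1, hbuf]
    by_cases hw : b.1 = []
    · simp [hw, joinChars, popTrail_nil, joinHyphen]
    · simp only [hw, ite_false]
      rw [List.append_nil, popTrail_concat_hyphen,
          popTrail_no_hyphen _ (joinChars_last_ne _ h3)]
      exact ofList_eq_joinHyphen _ _ rfl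
  · simp only [hbuf, ite_false]
    have hpt : popTrail a.1 = a.1 := by
      apply popTrail_no_hyphen
      rw [h1, List.getLast?_append_of_ne_nil _ hbuf]
      intro hc
      exact h4 (List.mem_of_getLast? hc)
    rw [hpt, h1]
    apply ofList_eq_joinHyphen
    rw [joinChars_append_one]
    simp
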